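-- pv_equiv track=rewrite | github.com/defin85/command-center-1c | orchestrator/apps/intercompany_pools/metadata_catalog.py | _normalize_function_parameters
-- ===== SOURCE A (Python) =====
-- from collections.abc import Mapping
--
-- def _normalize_function_parameters(raw_parameters: object) -> list[dict[str, str]]:
--     if not isinstance(raw_parameters, list):
--         return []
--     normalized_items: list[dict[str, str]] = []
--     seen: set[str] = set()
--     for raw_item in raw_parameters:
--         if not isinstance(raw_item, Mapping):
--             continue
--         name = str(raw_item.get("name") or "").strip()
--         if not name or name in seen:
--             continue
--         seen.add(name)
--         normalized_items.append(
--             {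
--                 "name": name,
--                 "type": str(raw_item.get("type") or "").strip(),
--             }
--         )
--     normalized_items.sort(key=lambda item: item["name"])
--     return normalized_items
-- ===== SOURCE B (Python) =====
-- from collections.abc import Mapping
--
-- def _normalize_function_parameters(raw_parameters):
--     if not isinstance(raw_parameters, list):
--         return []
--     items = []
--     for raw_item in raw_parameters:
--         if not isinstance(raw_item, Mapping):
--             continue
--         name = str(raw_item.get("name") or "").strip()
--         if name:
--             items.append({"name": name, "type": str(raw_item.get("type") or "").strip()})
--     items = sorted(items, key=lambda item: item["name"])
--     out = []
--     prev = None
--     for item in items: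
--         if item["name"] != prev:
--             out.append(item)
--             prev = item["name"]
--     return out
-- ===== Notes on version B (the rewrite author's own statement) =====
-- stated objective: alternative
-- what changed: A dedups with a seen-set while collecting and sorts afterwards; B collects every normalized item without any dedup state, stable-sorts by name, and collapses equal-name runs in a single final pass keeping the first (stability makes that the earliest occurrence, as A keeps).
import Mathlib
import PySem

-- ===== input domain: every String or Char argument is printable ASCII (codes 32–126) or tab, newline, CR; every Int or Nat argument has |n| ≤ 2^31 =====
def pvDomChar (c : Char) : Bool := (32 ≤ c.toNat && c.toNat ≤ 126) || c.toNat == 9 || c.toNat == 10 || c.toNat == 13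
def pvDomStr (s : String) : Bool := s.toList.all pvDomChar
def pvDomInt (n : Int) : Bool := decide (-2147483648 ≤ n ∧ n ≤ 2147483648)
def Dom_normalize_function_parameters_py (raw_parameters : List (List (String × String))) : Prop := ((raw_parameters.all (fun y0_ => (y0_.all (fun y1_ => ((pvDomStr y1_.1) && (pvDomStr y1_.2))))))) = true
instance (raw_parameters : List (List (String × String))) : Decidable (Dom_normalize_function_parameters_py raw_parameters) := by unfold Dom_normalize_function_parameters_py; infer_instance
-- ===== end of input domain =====

-- B replaces A's seen-set dedup-then-sort by: collect all normalized items, stable-sort by name,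
-- collapse equal-name runs in one pass keeping the first (objective: alternative decomposition, same cost).

-- str(raw_item.get(k) or ""): .get gives None → "" via `or`; "" or "" is also "", so a total
-- `getD ""` is exact; str() on a str is the identity.  (Also used for item["name"], which on the
-- dicts both programs build is always present, so the `getD ""` default is never taken.)
def pvGetStr (item : List (String × String)) (k : String) : String :=
  ((PySem.Dict.mk item).get? k).getD ""

-- ===== PORT A =====
def normalize_function_parameters_py (raw_parameters : List (List (String × String))) : List (List (String × String)) :=
  -- isinstance checks are vacuous under the type: the argument is a list of mappings
  let r := raw_parameters.foldl
    (fun (st : List (List (String × String)) × PySem.Set String) raw_item =>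
      let name := PySem.Str.strip (pvGetStr raw_item "name")
      if name = "" ∨ PySem.Set.contains st.2 name then st
      else (st.1 ++ [[("name", name), ("type", PySem.Str.strip (pvGetStr raw_item "type"))]],
            PySem.Set.add st.2 name))
    ([], PySem.Set.empty)
  PySem.List.sorted r.1 (fun item => pvGetStr item "name") false

-- ===== PORT B =====
def normalize_function_parameters_py_alt (raw_parameters : List (List (String × String))) : List (List (String × String)) :=
  let items := raw_parameters.foldl
    (fun (acc : List (List (String × String))) raw_item =>
      let name := PySem.Str.strip (pvGetStr raw_item "name")
      if name = "" then acc
      else acc ++ [[("name", name), ("type", PySem.Str.strip (pvGetStr raw_item "type"))]])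
    []
  let items := PySem.List.sorted items (fun item => pvGetStr item "name") false
  (items.foldl
    (fun (st : List (List (String × String)) × Option String) item =>
      if (some (pvGetStr item "name") : Option String) ≠ st.2 then
        (st.1 ++ [item], some (pvGetStr item "name"))
      else st)
    ([], none)).1

-- ===== PRECONDITION & SPEC =====
def Spec_normalize_function_parameters_py (raw_parameters : List (List (String × String))) (out : List (List (String × String))) : Prop := out = normalize_function_parameters_py_alt raw_parameters
instance (raw_parameters : List (List (String × String))) (out : List (List (String × String))) : Decidable (Spec_normalize_function_parameters_py raw_parameters out) := by unfold Spec_normalize_function_parameters_py; infer_instance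

-- ===== CLAIM (what is proved, stated in full; the proofs are below) =====
def Claim_equal_normalize_function_parameters_py : Prop := ∀ (raw_parameters : List (List (String × String))), Dom_normalize_function_parameters_py raw_parameters → Spec_normalize_function_parameters_py raw_parameters (normalize_function_parameters_py raw_parameters)

-- ===== LEMMAS AND PROOFS =====

-- the sort key (the name field of a normalized item)
def pvKey (item : List (String × String)) : String := pvGetStr item "name"

-- the stripped name of a raw item
def pvNm (raw_item : List (String × String)) : String := PySem.Str.strip (pvGetStr raw_item "name")

-- the normalized dict A and B build for a raw item
def pvNorm (raw_item : List (String × String)) : List (String × String) :=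
  [("name", pvNm raw_item), ("type", PySem.Str.strip (pvGetStr raw_item "type"))]

-- all normalized items with nonempty name, in appearance order (B's first loop)
def pvItems (raw : List (List (String × String))) : List (List (String × String)) :=
  raw.filterMap (fun ri => if pvNm ri = "" then none else some (pvNorm ri))

-- dedup keeping the first item of each key (filter formulation)
def pvDF : List (List (String × String)) → List (List (String × String))
  | [] => []
  | a :: t => a :: pvDF (t.filter (fun z => pvKey z ≠ pvKey a))
  termination_by l => l.length
  decreasing_by
    have h := List.length_filter_le (fun x => !decide (pvKey x.1 = pvKey a)) t.attach
    simp at h ⊢; omega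

-- collapse of equal-key runs keeping the first (B's second loop)
def pvColAux (p : String) : List (List (String × String)) → List (List (String × String))
  | [] => []
  | x :: t => if pvKey x = p then pvColAux p t else x :: pvColAux (pvKey x) t

def pvCol : List (List (String × String)) → List (List (String × String))
  | [] => []
  | x :: t => x :: pvColAux (pvKey x) t

def pvIns (x : List (String × String)) (s : List (List (String × String))) : List (List (String × String)) :=
  PySem.List.insertBy (fun a b => decide (pvKey a < pvKey b)) x s

theorem pvKey_norm (ri : List (String × String)) : pvKey (pvNorm ri) = pvNm ri := by
  simp [pvKey, pvNorm, pvGetStr, PySem.Dict.get?_mk_cons]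

-- A's loop = seen-filtered dedup-first of the item stream
theorem pvDF_cons (a : List (String × String)) (t : List (List (String × String))) :
    pvDF (a :: t) = a :: pvDF (t.filter (fun z => pvKey z ≠ pvKey a)) := by
  rw [pvDF]

theorem pvDF_nil : pvDF [] = [] := by rw [pvDF]

theorem pvFoldA (raw : List (List (String × String)))
    (acc : List (List (String × String))) (seen : PySem.Set String) :
    (raw.foldl
      (fun (st : List (List (String × String)) × PySem.Set String) raw_item =>
        let name := PySem.Str.strip (pvGetStr raw_item "name")
        if name = "" ∨ PySem.Set.contains st.2 name then st
        else (st.1 ++ [[("name", name), ("type", PySem.Str.strip (pvGetStr raw_item "type"))]],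
              PySem.Set.add st.2 name))
      (acc, seen)).1
    = acc ++ pvDF ((pvItems raw).filter (fun z => !PySem.Set.contains seen (pvKey z))) := by
  induction raw generalizing acc seen with
  | nil => simp [pvItems, pvDF]
  | cons ri t ih =>
    rw [List.foldl_cons]
    by_cases h1 : pvNm ri = ""
    · have h1' : PySem.Str.strip (pvGetStr ri "name") = "" := h1
      simp only [h1']
      rw [ih]
      simp [pvItems, h1]
    · have h1' : ¬ PySem.Str.strip (pvGetStr ri "name") = "" := h1
      have hitems : (pvItems (ri :: t)) = pvNorm ri :: pvItems t := by
        simp [pvItems, h1]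
      by_cases h2 : PySem.Set.contains seen (pvNm ri) = true
      · have h2' : PySem.Set.contains seen (PySem.Str.strip (pvGetStr ri "name")) = true := h2
        simp only [h2']
        rw [ih, hitems]
        have hmem : pvNm ri ∈ seen := (PySem.Set.contains_iff _ _).1 h2
        simp [pvKey_norm, hmem]
      · rw [if_neg (by
          rintro (h | h)
          · exact h1' h
          · exact h2 h)]
        rw [ih, hitems]
        have h2f : PySem.Set.contains seen (pvNm ri) = false := by
          simpa using h2
        simp only [List.filter_cons, pvKey_norm, h2f, Bool.not_false, if_pos]
        rw [pvDF_cons]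
        simp only [List.append_assoc, List.singleton_append]
        congr 2
        rw [List.filter_filter]
        congr 1
        apply List.filter_congr
        intro z _
        have hca : PySem.Set.contains (PySem.Set.add seen (pvNm ri)) (pvKey z)
            = (PySem.Set.contains seen (pvKey z) || pvKey z == pvNm ri) := by
          simp [pysem, beq_eq_decide]
        rw [show PySem.Str.strip (pvGetStr ri "name") = pvNm ri from rfl, hca, pvKey_norm]
        cases hc : PySem.Set.contains seen (pvKey z) <;>
          by_cases he : pvKey z = pvNm ri <;> simp [he]

-- B's first loop builds pvItems
theorem pvFoldB1 (raw : List (List (String × String))) (acc : List (List (String × String))) :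
    raw.foldl
      (fun (acc : List (List (String × String))) raw_item =>
        let name := PySem.Str.strip (pvGetStr raw_item "name")
        if name = "" then acc
        else acc ++ [[("name", name), ("type", PySem.Str.strip (pvGetStr raw_item "type"))]])
      acc
    = acc ++ pvItems raw := by
  induction raw generalizing acc with
  | nil => simp [pvItems]
  | cons ri t ih =>
    rw [List.foldl_cons]
    by_cases h : pvNm ri = ""
    · have h' : PySem.Str.strip (pvGetStr ri "name") = "" := h
      simp only [h']
      rw [ih]; simp [pvItems, h]
    · have h' : ¬ PySem.Str.strip (pvGetStr ri "name") = "" := h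
      rw [if_neg h', ih]
      simp [pvItems, pvNorm, pvNm, h']

-- B's second loop is pvCol
theorem pvFoldB2aux (l : List (List (String × String)))
    (out : List (List (String × String))) (p : String) :
    (l.foldl
      (fun (st : List (List (String × String)) × Option String) item =>
        if (some (pvGetStr item "name") : Option String) ≠ st.2 then
          (st.1 ++ [item], some (pvGetStr item "name"))
        else st)
      (out, some p)).1 = out ++ pvColAux p l := by
  induction l generalizing out p with
  | nil => simp [pvColAux]
  | cons x t ih =>
    rw [List.foldl_cons]
    by_cases h : pvKey x = p
    · have h' : ¬ (some (pvGetStr x "name") : Option String) ≠ some p := by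
        simp [← h, pvKey]
      rw [if_neg h', ih, pvColAux, if_pos h]
    · have h' : (some (pvGetStr x "name") : Option String) ≠ some p := by
        simpa [pvKey] using h
      rw [if_pos h', ih, pvColAux, if_neg h]
      simp [pvKey]

theorem pvFoldB2 (l : List (List (String × String))) :
    (l.foldl
      (fun (st : List (List (String × String)) × Option String) item =>
        if (some (pvGetStr item "name") : Option String) ≠ st.2 then
          (st.1 ++ [item], some (pvGetStr item "name"))
        else st)
      ([], none)).1 = pvCol l := by
  cases l with
  | nil => rfl
  | cons x t =>
    rw [List.foldl_cons, if_pos (by simp)]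
    rw [pvFoldB2aux]
    simp [pvCol, pvKey]

theorem pvIns_of_head_gt (x : List (String × String)) (l : List (List (String × String)))
    (h : ∀ z ∈ l, pvKey x < pvKey z) : pvIns x l = x :: l := by
  cases l with
  | nil => rfl
  | cons z t =>
    have := h z (by simp)
    simp [pvIns, PySem.List.insertBy, this]

theorem pvFilter_ins (p : List (String × String) → Bool) (x : List (String × String))
    (t : List (List (String × String)))
    (hs : t.Pairwise (fun a b => pvKey a ≤ pvKey b)) :
    (pvIns x t).filter p = if p x then pvIns x (t.filter p) else t.filter p := by
  induction t with
  | nil =>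
    cases hp : p x <;> simp [pvIns, PySem.List.insertBy, hp]
  | cons y ys ih =>
    have hpw := (List.pairwise_cons.1 hs).1
    have htl := (List.pairwise_cons.1 hs).2
    by_cases hlt : pvKey x < pvKey y
    · have hins : pvIns x (y :: ys) = x :: y :: ys := by
        simp [pvIns, PySem.List.insertBy, hlt]
      rw [hins]
      cases hp : p x with
      | false => simp [hp]
      | true =>
        have : pvIns x ((y :: ys).filter p) = x :: (y :: ys).filter p := by
          apply pvIns_of_head_gt
          intro z hz
          have hz' := List.mem_of_mem_filter hz
          rcases List.mem_cons.1 hz' with h | h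
          · exact h ▸ hlt
          · exact lt_of_lt_of_le hlt (hpw z h)
        rw [this]
        simp [hp]
    · have hins : pvIns x (y :: ys) = y :: pvIns x ys := by
        simp [pvIns, PySem.List.insertBy, hlt]
      rw [hins]
      rw [List.filter_cons]
      rw [ih htl]
      cases hp : p x with
      | false =>
        cases hpy : p y <;> simp [hpy]
      | true =>
        cases hpy : p y with
        | false => simp [hpy]
        | true =>
          simp only [List.filter_cons, hpy, if_pos]
          have : pvIns x (y :: ys.filter p) = y :: pvIns x (ys.filter p) := by
            simp [pvIns, PySem.List.insertBy, hlt]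
          simp [this]

theorem pvColAux_sorted (t : List (List (String × String))) (p : String)
    (hs : t.Pairwise (fun a b => pvKey a ≤ pvKey b)) (hp : ∀ z ∈ t, p ≤ pvKey z) :
    pvColAux p t = pvDF (t.filter (fun z => pvKey z ≠ p)) := by
  induction t generalizing p with
  | nil => simp [pvColAux, pvDF]
  | cons z r ih =>
    have hpw := (List.pairwise_cons.1 hs).1
    have htl := (List.pairwise_cons.1 hs).2
    by_cases h : pvKey z = p
    · rw [pvColAux, if_pos h, List.filter_cons, if_neg (by simp [h])]
      exact ih p htl (fun w hw => le_of_eq_of_le h.symm (hpw w hw))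
    · rw [pvColAux, if_neg h, List.filter_cons, if_pos (by simp [h]), pvDF_cons]
      rw [List.filter_filter]
      congr 1
      rw [ih (pvKey z) htl (fun w hw => hpw w hw)]
      congr 1
      apply List.filter_congr
      intro w hw
      have hzw : pvKey z ≤ pvKey w := hpw w hw
      have hpz : p < pvKey z := lt_of_le_of_ne (hp z (by simp)) (fun he => h he.symm)
      have : pvKey w ≠ p := fun he => absurd (he ▸ hzw) (not_le_of_gt hpz)
      simp [this]

theorem pvCol_sorted (t : List (List (String × String)))
    (hs : t.Pairwise (fun a b => pvKey a ≤ pvKey b)) : pvCol t = pvDF t := by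
  cases t with
  | nil => rw [pvCol, pvDF]
  | cons x r =>
    rw [pvCol, pvDF_cons]
    congr 1
    exact pvColAux_sorted r (pvKey x) (List.pairwise_cons.1 hs).2 (List.pairwise_cons.1 hs).1

theorem pvDF_ins_aux (n : Nat) : ∀ (x : List (String × String)) (s : List (List (String × String))),
    s.length ≤ n → s.Pairwise (fun a b => pvKey a ≤ pvKey b) →
    pvDF (pvIns x s) = if pvKey x ∈ s.map pvKey then pvDF s else pvIns x (pvDF s) := by
  induction n with
  | zero =>
    intro x s hlen _
    have : s = [] := List.length_eq_zero_iff.1 (Nat.le_zero.1 hlen)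
    subst this
    simp [pvIns, PySem.List.insertBy, pvDF, pvDF_cons]
  | succ n ih =>
    intro x s hlen hs
    cases s with
    | nil => simp [pvIns, PySem.List.insertBy, pvDF, pvDF_cons]
    | cons y t =>
      have hpw := (List.pairwise_cons.1 hs).1
      have htl := (List.pairwise_cons.1 hs).2
      by_cases hlt : pvKey x < pvKey y
      · have hins : pvIns x (y :: t) = x :: y :: t := by
          simp [pvIns, PySem.List.insertBy, hlt]
        have hnm : pvKey x ∉ (y :: t).map pvKey := by
          intro hm
          rcases List.mem_map.1 hm with ⟨z, hz, he⟩
          rcases List.mem_cons.1 hz with h | h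
          · exact absurd (he ▸ hlt) (by rw [h]; exact lt_irrefl _)
          · exact absurd (he ▸ hlt) (not_lt_of_ge (hpw z h))
        rw [hins, if_neg hnm, pvDF_cons]
        have hself : (y :: t).filter (fun z => pvKey z ≠ pvKey x) = y :: t := by
          apply List.filter_eq_self.2
          intro z hz
          have : pvKey x < pvKey z := by
            rcases List.mem_cons.1 hz with h | h
            · exact h ▸ hlt
            · exact lt_of_lt_of_le hlt (hpw z h)
          simp [ne_of_gt this]
        rw [hself, pvDF_cons]
        simp [pvIns, PySem.List.insertBy, hlt]
      · have hins : pvIns x (y :: t) = y :: pvIns x t := by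
          simp [pvIns, PySem.List.insertBy, hlt]
        by_cases heq : pvKey x = pvKey y
        · have hmem : pvKey x ∈ (y :: t).map pvKey := by
            simp [heq]
          rw [hins, if_pos hmem, pvDF_cons, pvDF_cons]
          congr 1
          rw [pvFilter_ins _ _ _ htl, if_neg (by simp [heq])]
        · have hgt : pvKey y < pvKey x := lt_of_le_of_ne (le_of_not_gt hlt) (fun h => heq h.symm)
          rw [hins, pvDF_cons, pvDF_cons]
          rw [pvFilter_ins _ _ _ htl, if_pos (by simp [heq])]
          have hlen' : (t.filter (fun z => pvKey z ≠ pvKey y)).length ≤ n := by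
            have := List.length_filter_le (fun z => decide (pvKey z ≠ pvKey y)) t
            simp at hlen
            omega
          have hpair' : (t.filter (fun z => pvKey z ≠ pvKey y)).Pairwise
              (fun a b => pvKey a ≤ pvKey b) := List.Pairwise.sublist List.filter_sublist htl
          rw [ih x _ hlen' hpair']
          have hmemiff : (pvKey x ∈ (t.filter (fun z => pvKey z ≠ pvKey y)).map pvKey)
              ↔ pvKey x ∈ (y :: t).map pvKey := by
            simp only [List.mem_map, List.mem_filter, List.mem_cons]
            constructor
            · rintro ⟨z, ⟨hz, _⟩, he⟩; exact ⟨z, Or.inr hz, he⟩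
            · rintro ⟨z, hz, he⟩
              rcases hz with rfl | h
              · exact absurd he.symm heq
              · exact ⟨z, ⟨h, by simp [he, heq]⟩, he⟩
          by_cases hm : pvKey x ∈ (y :: t).map pvKey
          · rw [if_pos (hmemiff.2 hm), if_pos hm]
          · rw [if_neg (fun hh => hm (hmemiff.1 hh)), if_neg hm]
            have : pvIns x (y :: pvDF (t.filter (fun z => pvKey z ≠ pvKey y)))
                = y :: pvIns x (pvDF (t.filter (fun z => pvKey z ≠ pvKey y))) := by
              simp [pvIns, PySem.List.insertBy, hlt]
            rw [this]

theorem pvDF_ins (x : List (String × String)) (s : List (List (String × String)))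
    (hs : s.Pairwise (fun a b => pvKey a ≤ pvKey b)) :
    pvDF (pvIns x s) = if pvKey x ∈ s.map pvKey then pvDF s else pvIns x (pvDF s) := by
  exact pvDF_ins_aux s.length x s (le_refl _) hs

theorem pvDF_append_aux (n : Nat) : ∀ (x : List (String × String)) (as : List (List (String × String))),
    as.length ≤ n →
    pvDF (as ++ [x]) = if pvKey x ∈ as.map pvKey then pvDF as else pvDF as ++ [x] := by
  induction n with
  | zero =>
    intro x as hlen
    have : as = [] := List.length_eq_zero_iff.1 (Nat.le_zero.1 hlen)
    subst this
    simp [pvDF, pvDF_cons]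
  | succ n ih =>
    intro x as hlen
    cases as with
    | nil => simp [pvDF, pvDF_cons]
    | cons a t =>
      rw [List.cons_append, pvDF_cons, List.filter_append]
      by_cases heq : pvKey x = pvKey a
      · rw [if_pos (by simp [heq])]
        rw [pvDF_cons]
        congr 1
        simp [heq]
      · have hx : (([x] : List (List (String × String))).filter (fun z => pvKey z ≠ pvKey a)) = [x] := by
          simp [heq]
        rw [hx]
        have hlen' : (t.filter (fun z => pvKey z ≠ pvKey a)).length ≤ n := by
          have := List.length_filter_le (fun z => decide (pvKey z ≠ pvKey a)) t
          simp at hlen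
          omega
        rw [ih x _ hlen']
        have hmemiff : (pvKey x ∈ (t.filter (fun z => pvKey z ≠ pvKey a)).map pvKey)
            ↔ pvKey x ∈ (a :: t).map pvKey := by
          simp only [List.mem_map, List.mem_filter, List.mem_cons]
          constructor
          · rintro ⟨z, ⟨hz, _⟩, he⟩; exact ⟨z, Or.inr hz, he⟩
          · rintro ⟨z, hz, he⟩
            rcases hz with rfl | h
            · exact absurd he.symm heq
            · exact ⟨z, ⟨h, by simp [he, heq]⟩, he⟩
        by_cases hm : pvKey x ∈ (a :: t).map pvKey
        · rw [if_pos (hmemiff.2 hm), if_pos hm, pvDF_cons]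
        · rw [if_neg (fun hh => hm (hmemiff.1 hh)), if_neg hm, pvDF_cons]
          simp

theorem pvDF_append (as : List (List (String × String))) (x : List (String × String)) :
    pvDF (as ++ [x]) = if pvKey x ∈ as.map pvKey then pvDF as else pvDF as ++ [x] := by
  exact pvDF_append_aux as.length x as (le_refl _)

theorem pvSorted_append (l : List (List (String × String))) (x : List (String × String)) :
    PySem.List.sorted (l ++ [x]) pvKey false = pvIns x (PySem.List.sorted l pvKey false) := by
  rw [PySem.List.sorted_eq_foldl_insertBy, PySem.List.sorted_eq_foldl_insertBy, List.foldl_append]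
  rfl

theorem pvMain (as : List (List (String × String))) :
    PySem.List.sorted (pvDF as) pvKey false = pvDF (PySem.List.sorted as pvKey false) := by
  induction as using List.reverseRecOn with
  | nil =>
    have h1 : PySem.List.sorted ([] : List (List (String × String))) pvKey false = [] := rfl
    rw [pvDF_nil, h1, pvDF_nil]
  | append_singleton as x ih =>
    rw [pvSorted_append, pvDF_append,
      pvDF_ins x _ (PySem.List.sorted_pairwise as pvKey)]
    have hmemiff : pvKey x ∈ (PySem.List.sorted as pvKey false).map pvKey
        ↔ pvKey x ∈ as.map pvKey := by
      simp only [List.mem_map]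
      constructor
      · rintro ⟨z, hz, he⟩; exact ⟨z, (PySem.List.mem_sorted _ _ _ _).1 hz, he⟩
      · rintro ⟨z, hz, he⟩; exact ⟨z, (PySem.List.mem_sorted _ _ _ _).2 hz, he⟩
    by_cases hm : pvKey x ∈ as.map pvKey
    · rw [if_pos hm, if_pos (hmemiff.2 hm), ih]
    · rw [if_neg hm, if_neg (fun hh => hm (hmemiff.1 hh)), pvSorted_append, ih]

-- ===== VERDICT (by name: the statement is the Claim_ definition above) =====
theorem normalize_function_parameters_py_spec : Claim_equal_normalize_function_parameters_py := by
  intro raw _dom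
  unfold Spec_normalize_function_parameters_py
  show normalize_function_parameters_py raw = normalize_function_parameters_py_alt raw
  unfold normalize_function_parameters_py normalize_function_parameters_py_alt
  simp only []
  rw [pvFoldA raw [] PySem.Set.empty, pvFoldB1 raw [], pvFoldB2]
  rw [show (fun item => pvGetStr item "name") = pvKey from rfl]
  have hfe : (pvItems raw).filter (fun z => !PySem.Set.contains PySem.Set.empty (pvKey z))
      = pvItems raw := by
    apply List.filter_eq_self.2
    intro z _
    rfl
  rw [hfe, List.nil_append, List.nil_append]
  rw [pvMain, pvCol_sorted _ (PySem.List.sorted_pairwise _ pvKey)]
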